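-- pv_equiv track=rewrite | github.com/b3p3k0/dirracuda | gui/utils/batch_extract_helpers.py | sort_extensions
-- ===== SOURCE A (Python) =====
-- from typing import Any, Dict, List, Tuple
--
-- NO_EXTENSION_TOKEN = "<no extension>"
--
-- def sort_extensions(extensions: List[str]) -> List[str]:
--     """Return a deduplicated, alphabetically sorted copy with NO_EXTENSION_TOKEN pinned at top.
--
--     Also mutates ``extensions`` in-place to match the returned order.
--
--     Args:
--         extensions: List of extension strings to sort.
--
--     Returns:
--         The sorted list (same object as ``extensions`` after mutation).
--     """
--     has_no_ext = any(e.lower() == NO_EXTENSION_TOKEN for e in extensions)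
--
--     # Deduplicate while preserving first-seen case
--     unique: List[str] = []
--     seen: set = set()
--     for ext in extensions:
--         key = ext.lower()
--         if key in seen:
--             continue
--         seen.add(key)
--         unique.append(ext)
--
--     sorted_exts = sorted(
--         [e for e in unique if e.lower() != NO_EXTENSION_TOKEN],
--         key=str.lower,
--     )
--     if has_no_ext:
--         sorted_exts.insert(0, NO_EXTENSION_TOKEN)
--
--     # Mutate in-place so callers holding a reference see the updated order
--     extensions.clear()
--     extensions.extend(sorted_exts)
--
--     return sorted_exts
-- ===== SOURCE B (Python) =====
-- NO_EXTENSION_TOKEN = "<no extension>"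
--
-- def sort_extensions(extensions):
--     # One stable sort up front, then a single adjacent-run scan deduplicates
--     # (no seen-set, no post-sort): stability keeps the first-seen casing.
--     ordered = []
--     prev = None
--     for e in sorted(extensions, key=str.lower):
--         k = e.lower()
--         if k != prev:
--             ordered.append(e)
--             prev = k
--     has_no_ext = any(e.lower() == NO_EXTENSION_TOKEN for e in ordered)
--     result = [e for e in ordered if e.lower() != NO_EXTENSION_TOKEN]
--     if has_no_ext:
--         result.insert(0, NO_EXTENSION_TOKEN)
--     extensions[:] = result
--     return result
-- ===== Notes on version B (the rewrite author's own statement) =====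
-- stated objective: alternative
-- what changed: A deduplicates with a seen-set pass over the original order and then sorts the survivors; B sorts once (stably, by lowercase) and deduplicates in a single adjacent-run scan over the sorted list, relying on stability to keep the first-seen casing.
import Mathlib
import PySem

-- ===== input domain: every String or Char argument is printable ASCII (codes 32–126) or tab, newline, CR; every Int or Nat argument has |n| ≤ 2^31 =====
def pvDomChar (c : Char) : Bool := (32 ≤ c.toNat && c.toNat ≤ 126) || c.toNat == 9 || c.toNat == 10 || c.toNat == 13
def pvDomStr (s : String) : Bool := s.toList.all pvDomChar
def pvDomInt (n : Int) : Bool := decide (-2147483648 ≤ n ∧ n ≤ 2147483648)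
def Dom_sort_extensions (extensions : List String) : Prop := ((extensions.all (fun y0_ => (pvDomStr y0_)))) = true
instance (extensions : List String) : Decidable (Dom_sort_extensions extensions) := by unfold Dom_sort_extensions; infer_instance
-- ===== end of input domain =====

-- B replaces A's seen-set dedup + post-sort by one stable sort followed by a single
-- adjacent-run scan (objective: alternative decomposition, same asymptotic cost).
-- Both Pythons also mutate `extensions` in place identically; the theorems here are
-- about the returned value.

-- ===== PORT A =====
def sort_extensions (extensions : List String) : List String :=
  let has_no_ext := extensions.any (fun e => PySem.Str.lower e == "<no extension>")
  let us := extensions.foldl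
    (fun (p : List String × PySem.Set String) ext =>
      let k := PySem.Str.lower ext
      if PySem.Set.contains p.2 k then p else (p.1 ++ [ext], PySem.Set.add p.2 k))
    ([], PySem.Set.empty)
  let sorted_exts := PySem.List.sorted
    ((us.1).filter (fun e => !(PySem.Str.lower e == "<no extension>")))
    (fun e => PySem.Str.lower e) false
  if has_no_ext then "<no extension>" :: sorted_exts else sorted_exts

-- ===== PORT B =====
def sort_extensions_alt (extensions : List String) : List String :=
  let op := (PySem.List.sorted extensions (fun e => PySem.Str.lower e) false).foldl
    (fun (p : List String × Option String) e =>
      let k := PySem.Str.lower e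
      if p.2 == some k then p else (p.1 ++ [e], some k))
    ([], none)
  let ordered := op.1
  let has_no_ext := ordered.any (fun e => PySem.Str.lower e == "<no extension>")
  let result := ordered.filter (fun e => !(PySem.Str.lower e == "<no extension>"))
  if has_no_ext then "<no extension>" :: result else result

-- ===== PRECONDITION & SPEC =====
def Spec_sort_extensions (extensions : List String) (out : List String) : Prop := out = sort_extensions_alt extensions
instance (extensions : List String) (out : List String) : Decidable (Spec_sort_extensions extensions out) := by unfold Spec_sort_extensions; infer_instance

-- ===== CLAIM (what is proved, stated in full; the proofs are below) =====
def Claim_equal_sort_extensions : Prop := ∀ (extensions : List String), Dom_sort_extensions extensions → Spec_sort_extensions extensions (sort_extensions extensions)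

-- ===== LEMMAS AND PROOFS =====

-- global dedup by key, keeping the first occurrence of each unseen key
def pvDdk (key : String → String) (seen : PySem.Set String) : List String → List String
  | [] => []
  | x :: l =>
      if PySem.Set.contains seen (key x) then pvDdk key seen l
      else x :: pvDdk key (PySem.Set.add seen (key x)) l

-- adjacent-run compression by key (B's scan)
def pvCmp (key : String → String) (p : Option String) : List String → List String
  | [] => []
  | x :: l => if p == some (key x) then pvCmp key p l else x :: pvCmp key (some (key x)) l

theorem pvDdk_sublist (key : String → String) (seen : PySem.Set String) (l : List String) :
    (pvDdk key seen l).Sublist l := by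
  induction l generalizing seen with
  | nil => simp [pvDdk]
  | cons x l ih =>
    simp only [pvDdk]
    split
    · exact (ih seen).cons x
    · exact (ih _).cons₂ x

theorem pvSeen_contains (seen : PySem.Set String) (k : String) :
    PySem.Set.contains seen k = true ↔ k ∈ seen := by
  simp [PySem.Set.contains]

theorem pvSeen_add_mem (seen : PySem.Set String) (k k' : String) :
    k' ∈ PySem.Set.add seen k ↔ k' ∈ seen ∨ k' = k := by
  simp only [PySem.Set.add]
  split
  · rename_i h
    rw [pvSeen_contains] at h
    constructor
    · exact Or.inl
    · rintro (h' | h')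
      · exact h'
      · subst h'; exact h
  · simp

theorem pvDdk_not_seen (key : String → String) (seen : PySem.Set String) (l : List String)
    {e : String} (he : e ∈ pvDdk key seen l) : key e ∉ seen := by
  induction l generalizing seen with
  | nil => simp [pvDdk] at he
  | cons x l ih =>
    simp only [pvDdk] at he
    split at he
    · exact ih seen he
    · rename_i hx
      rw [pvSeen_contains] at hx
      rcases List.mem_cons.1 he with h | h
      · subst h; exact hx
      · have := ih _ h
        rw [pvSeen_add_mem] at this
        exact fun hc => this (Or.inl hc)

theorem pvDdk_keys_nodup (key : String → String) (seen : PySem.Set String) (l : List String) :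
    ((pvDdk key seen l).map key).Nodup := by
  induction l generalizing seen with
  | nil => simp [pvDdk]
  | cons x l ih =>
    simp only [pvDdk]
    split
    · exact ih seen
    · simp only [List.map_cons, List.nodup_cons]
      refine ⟨?_, ih _⟩
      intro hmem
      rcases List.mem_map.1 hmem with ⟨e, he, hke⟩
      have := pvDdk_not_seen key _ l he
      rw [pvSeen_add_mem] at this
      exact this (Or.inr hke)

theorem pvDdk_mem (key : String → String) (seen : PySem.Set String) (l : List String) (e : String) :
    e ∈ pvDdk key seen l ↔
      key e ∉ seen ∧ l.find? (fun y => key y == key e) = some e := by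
  induction l generalizing seen with
  | nil => simp [pvDdk]
  | cons x l ih =>
    simp only [pvDdk]
    by_cases hx : PySem.Set.contains seen (key x) = true
    · rw [if_pos hx, pvSeen_contains] at *
      by_cases hk : key x = key e
      · constructor
        · intro h
          exact absurd (hk ▸ hx) ((ih seen).1 h).1
        · rintro ⟨h1, h2⟩
          exact absurd (hk ▸ hx) h1
      · have hbe : (key x == key e) = false := by simpa using hk
        rw [ih seen]
        simp [hbe]
    · rw [if_neg hx]
      rw [pvSeen_contains] at hx
      by_cases hk : key x = key e
      · have hbe : (key x == key e) = true := by simpa using hk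
        constructor
        · intro h
          rcases List.mem_cons.1 h with h | h
          · subst h
            exact ⟨hx, by simp⟩
          · exfalso
            have h1 := ((ih _).1 h).1
            rw [pvSeen_add_mem] at h1
            exact h1 (Or.inr hk.symm)
        · rintro ⟨h1, h2⟩
          simp only [List.find?_cons, hbe] at h2
          exact List.mem_cons.2 (Or.inl (by injection h2 with h'; exact h'.symm))
      · have hbe : (key x == key e) = false := by simpa using hk
        constructor
        · intro h
          rcases List.mem_cons.1 h with h | h
          · exact absurd rfl (h ▸ hk)
          · have := (ih _).1 h
            rw [pvSeen_add_mem] at this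
            refine ⟨fun hc => this.1 (Or.inl hc), ?_⟩
            simp [hbe, this.2]
        · rintro ⟨h1, h2⟩
          simp only [List.find?_cons, hbe] at h2
          refine List.mem_cons.2 (Or.inr ((ih _).2 ⟨?_, by simpa using h2⟩))
          rw [pvSeen_add_mem]
          rintro (h | h)
          · exact h1 h
          · exact hk h.symm

-- insertBy stability: same-key filter, when the target list is key-sorted
theorem pvIns_filter_pos (key : String → String) (x : String) (ys : List String)
    (h : ys.Pairwise (fun a b => key a ≤ key b)) :
    (PySem.List.insertBy (fun a b => decide (key a < key b)) x ys).filter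
        (fun y => key y == key x)
      = ys.filter (fun y => key y == key x) ++ [x] := by
  induction ys with
  | nil => simp [PySem.List.insertBy]
  | cons y ys ih =>
    simp only [PySem.List.insertBy]
    by_cases hlt : key x < key y
    · rw [if_pos (by simpa using hlt)]
      have hnil : (y :: ys).filter (fun z => key z == key x) = [] := by
        apply List.filter_eq_nil_iff.2
        intro z hz
        have hyz : key y ≤ key z := by
          rcases List.mem_cons.1 hz with h' | h'
          · subst h'; exact le_refl _
          · exact (List.pairwise_cons.1 h).1 z h'
        have : key x < key z := lt_of_lt_of_le hlt hyz
        simp [ne_of_gt this]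
      rw [List.filter_cons_of_pos (by simp), hnil]
      simp
    · rw [if_neg (by simpa using hlt)]
      simp only [List.filter_cons]
      rw [ih (List.pairwise_cons.1 h).2]
      split <;> simp

theorem pvIns_filter_ne (key : String → String) (x : String) (ys : List String) (k : String)
    (hk : (key x == k) = false) (before : String → String → Bool) :
    (PySem.List.insertBy before x ys).filter (fun y => key y == k)
      = ys.filter (fun y => key y == k) := by
  induction ys with
  | nil => simp [PySem.List.insertBy, hk]
  | cons y ys ih =>
    simp only [PySem.List.insertBy]
    split
    · simp [List.filter_cons, hk]
    · simp only [List.filter_cons, ih]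

-- stability of the PySem insertion sort: filtering one key class commutes with sorting
theorem pvSorted_filter_key (key : String → String) (xs : List String) (k : String) :
    (PySem.List.sorted xs key false).filter (fun y => key y == k)
      = xs.filter (fun y => key y == k) := by
  induction xs using List.reverseRecOn with
  | nil => simp [PySem.List.sorted]
  | append_singleton xs x ih =>
    have hs : PySem.List.sorted (xs ++ [x]) key false
        = PySem.List.insertBy (fun a b => decide (key a < key b)) x
            (PySem.List.sorted xs key false) := by
      rw [PySem.List.sorted_eq_foldl_insertBy, PySem.List.sorted_eq_foldl_insertBy,
        List.foldl_append]
      simp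
    rw [hs]
    by_cases hk : key x = k
    · subst hk
      rw [pvIns_filter_pos key x _ (PySem.List.sorted_pairwise xs key), ih]
      simp [List.filter_append]
    · have hbe : (key x == k) = false := by simpa using hk
      rw [pvIns_filter_ne key x _ k hbe, ih]
      simp [List.filter_append, hbe]

theorem pvSorted_find?_key (key : String → String) (xs : List String) (k : String) :
    (PySem.List.sorted xs key false).find? (fun y => key y == k)
      = xs.find? (fun y => key y == k) := by
  rw [← List.head?_filter, ← List.head?_filter, pvSorted_filter_key]

-- the two dedups pick the same elements
theorem pvDdk_perm (key : String → String) (xs : List String) :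
    (pvDdk key [] (PySem.List.sorted xs key false)).Perm (pvDdk key [] xs) := by
  have n1 : (pvDdk key [] (PySem.List.sorted xs key false)).Nodup :=
    List.Nodup.of_map key (pvDdk_keys_nodup key [] _)
  have n2 : (pvDdk key [] xs).Nodup := List.Nodup.of_map key (pvDdk_keys_nodup key [] xs)
  refine (List.perm_ext_iff_of_nodup n1 n2).2 (fun e => ?_)
  rw [pvDdk_mem, pvDdk_mem, pvSorted_find?_key]

theorem pvDdk_sorted_pairwise_lt (key : String → String) (xs : List String) :
    (pvDdk key [] (PySem.List.sorted xs key false)).Pairwise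
      (fun a b => key a < key b) := by
  have hle : (pvDdk key [] (PySem.List.sorted xs key false)).Pairwise
      (fun a b => key a ≤ key b) :=
    List.Pairwise.sublist (pvDdk_sublist key [] _) (PySem.List.sorted_pairwise xs key)
  have hne : (pvDdk key [] (PySem.List.sorted xs key false)).Pairwise
      (fun a b => key a ≠ key b) :=
    List.pairwise_map.1 (pvDdk_keys_nodup key [] _)
  exact (hle.and hne).imp (fun h => lt_of_le_of_ne h.1 h.2)

-- A's fold computes pvDdk
theorem pvFoldA (key : String → String) (l : List String) (acc : List String)
    (seen : PySem.Set String) :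
    (l.foldl
        (fun (p : List String × PySem.Set String) ext =>
          if PySem.Set.contains p.2 (key ext) then p
          else (p.1 ++ [ext], PySem.Set.add p.2 (key ext)))
        (acc, seen)).1 = acc ++ pvDdk key seen l := by
  induction l generalizing acc seen with
  | nil => simp [pvDdk]
  | cons x l ih =>
    simp only [List.foldl_cons, pvDdk]
    split
    · rw [ih]
    · rw [ih]; simp

-- B's fold computes pvCmp
theorem pvFoldB (key : String → String) (l : List String) (acc : List String)
    (p : Option String) :
    (l.foldl
        (fun (q : List String × Option String) e =>
          if q.2 == some (key e) then q else (q.1 ++ [e], some (key e)))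
        (acc, p)).1 = acc ++ pvCmp key p l := by
  induction l generalizing acc p with
  | nil => simp [pvCmp]
  | cons x l ih =>
    simp only [List.foldl_cons, pvCmp]
    split
    · rw [ih]
    · rw [ih]; simp

-- on a key-sorted list, adjacent-run compression equals global dedup
theorem pvCmp_eq_ddk (key : String → String) (l : List String) (seen : PySem.Set String)
    (p : Option String)
    (h1 : l.Pairwise (fun a b => key a ≤ key b))
    (h2 : ∀ y ∈ l, (key y ∈ seen ↔ p = some (key y)))
    (h3 : ∀ k, p = some k → ∀ y ∈ l, k ≤ key y) :
    pvCmp key p l = pvDdk key seen l := by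
  induction l generalizing seen p with
  | nil => simp [pvCmp, pvDdk]
  | cons x l ih =>
    simp only [pvCmp, pvDdk]
    have hx := h2 x (List.mem_cons_self ..)
    by_cases hc : p = some (key x)
    · rw [if_pos (by simp [hc]),
        if_pos ((pvSeen_contains seen (key x)).2 (hx.2 hc))]
      exact ih seen p (List.pairwise_cons.1 h1).2
        (fun y hy => h2 y (List.mem_cons_of_mem x hy))
        (fun k hk y hy => h3 k hk y (List.mem_cons_of_mem x hy))
    · have hnc : key x ∉ seen := fun h => hc (hx.1 h)
      rw [if_neg (by simp [hc]),
        if_neg (fun h => hnc ((pvSeen_contains seen (key x)).1 h))]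
      congr 1
      apply ih (PySem.Set.add seen (key x)) (some (key x)) (List.pairwise_cons.1 h1).2
      · intro y hy
        rw [pvSeen_add_mem]
        constructor
        · rintro (h | h)
          · -- key y already in seen: then p = some (key y), forcing key x = key y
            have hp := (h2 y (List.mem_cons_of_mem x hy)).1 h
            have hxy : key x ≤ key y := (List.pairwise_cons.1 h1).1 y hy
            have hyx : key y ≤ key x := h3 (key y) hp x (List.mem_cons_self ..)
            have hxy' : key x = key y := le_antisymm hxy hyx
            rw [hxy']
          · rw [h]
        · intro hp
          exact Or.inr (by injection hp with h'; exact h'.symm)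
      · intro k hk y hy
        have : k = key x := by injection hk with h'; exact h'.symm
        subst this
        exact (List.pairwise_cons.1 h1).1 y hy

-- membership of a key class is preserved by pvDdk (empty seen)
theorem pvDdk_exists_key (key : String → String) (l : List String) (k : String) :
    (∃ e ∈ pvDdk key [] l, key e = k) ↔ (∃ e ∈ l, key e = k) := by
  constructor
  · rintro ⟨e, he, hk⟩
    exact ⟨e, (pvDdk_sublist key [] l).mem he, hk⟩
  · rintro ⟨e, he, hk⟩
    have : l.find? (fun y => key y == k) |>.isSome := by
      rw [List.find?_isSome]
      exact ⟨e, he, by simp [hk]⟩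
    rcases Option.isSome_iff_exists.1 this with ⟨e₀, he₀⟩
    have hke₀ : key e₀ = k := by
      have := List.find?_some he₀
      simpa using this
    refine ⟨e₀, ?_, hke₀⟩
    rw [pvDdk_mem]
    refine ⟨by simp, ?_⟩
    rw [hke₀]
    exact he₀

-- ===== VERDICT (by name: the statement is the Claim_ definition above) =====
theorem sort_extensions_spec : Claim_equal_sort_extensions := by
  intro xs _
  unfold Spec_sort_extensions sort_extensions sort_extensions_alt
  have hB := pvFoldB (fun e => PySem.Str.lower e)
    (PySem.List.sorted xs (fun e => PySem.Str.lower e) false) [] none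
  have hA := pvFoldA (fun e => PySem.Str.lower e) xs [] PySem.Set.empty
  have hcmp : pvCmp (fun e => PySem.Str.lower e) none
        (PySem.List.sorted xs (fun e => PySem.Str.lower e) false)
      = pvDdk (fun e => PySem.Str.lower e) []
          (PySem.List.sorted xs (fun e => PySem.Str.lower e) false) := by
    apply pvCmp_eq_ddk _ _ _ _ (PySem.List.sorted_pairwise xs _)
    · intro y _; simp
    · intro k hk; simp at hk
  have hempty : (PySem.Set.empty : PySem.Set String) = [] := rfl
  have hflag : xs.any (fun e => PySem.Str.lower e == "<no extension>")
      = (pvDdk (fun e => PySem.Str.lower e) []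
          (PySem.List.sorted xs (fun e => PySem.Str.lower e) false)).any
          (fun e => PySem.Str.lower e == "<no extension>") := by
    have hiff : ∀ (l : List String),
        (l.any (fun e => PySem.Str.lower e == "<no extension>") = true) ↔
          ∃ e ∈ l, PySem.Str.lower e = "<no extension>" := by
      intro l; simp [List.any_eq_true]
    rw [Bool.eq_iff_iff, hiff, hiff,
      pvDdk_exists_key (fun e => PySem.Str.lower e) _ "<no extension>"]
    constructor
    · rintro ⟨e, he, hk⟩
      exact ⟨e, (PySem.List.mem_sorted xs _ false e).2 he, hk⟩
    · rintro ⟨e, he, hk⟩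
      exact ⟨e, (PySem.List.mem_sorted xs _ false e).1 he, hk⟩
  have hcore : PySem.List.sorted
        ((pvDdk (fun e => PySem.Str.lower e) [] xs).filter
          (fun e => !(PySem.Str.lower e == "<no extension>")))
        (fun e => PySem.Str.lower e) false
      = (pvDdk (fun e => PySem.Str.lower e) []
          (PySem.List.sorted xs (fun e => PySem.Str.lower e) false)).filter
          (fun e => !(PySem.Str.lower e == "<no extension>")) := by
    apply PySem.List.sorted_eq_of_perm_of_pairwise_lt
    · exact (pvDdk_perm (fun e => PySem.Str.lower e) xs).filter _
    · exact (pvDdk_sorted_pairwise_lt (fun e => PySem.Str.lower e) xs).filter _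
  simp only [hempty] at hA
  simp only [hempty, hA, hB, hcmp, List.nil_append, hflag, hcore]
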